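-- pv_equiv track=rewrite | github.com/rohitrasam/Python-Programs | HackerrankChallenges/BeautifulBinaryString.py | beautifulBinaryString
-- ===== SOURCE A (Python) =====
-- def beautifulBinaryString(binString: str):
--     # Write your code here
--
--     operations = 0
--     arr = list(binString)
--
--     for idx in range(0, len(arr)):
--         if arr[idx:idx+3] == ['0', '1', '0']:
--             arr[idx+2] = '1'
--             operations += 1
--     return operations
-- ===== SOURCE B (Python) =====
-- def beautifulBinaryString(binString: str):
--     operations = 0
--     i = 0
--     n = len(binString)
--     while i <= n - 3:
--         if binString[i:i+3] == "010":
--             operations += 1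
--             i += 3
--         else:
--             i += 1
--     return operations
-- ===== Notes on version B (the rewrite author's own statement) =====
-- stated objective: simpler
-- what changed: B drops A's mutable list copy and character-overwrite trick and instead scans the original string with an index that jumps three positions past each matched pattern, which is exactly the rematching that A's overwrite prevents, so no list is built or mutated.
import Mathlib
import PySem

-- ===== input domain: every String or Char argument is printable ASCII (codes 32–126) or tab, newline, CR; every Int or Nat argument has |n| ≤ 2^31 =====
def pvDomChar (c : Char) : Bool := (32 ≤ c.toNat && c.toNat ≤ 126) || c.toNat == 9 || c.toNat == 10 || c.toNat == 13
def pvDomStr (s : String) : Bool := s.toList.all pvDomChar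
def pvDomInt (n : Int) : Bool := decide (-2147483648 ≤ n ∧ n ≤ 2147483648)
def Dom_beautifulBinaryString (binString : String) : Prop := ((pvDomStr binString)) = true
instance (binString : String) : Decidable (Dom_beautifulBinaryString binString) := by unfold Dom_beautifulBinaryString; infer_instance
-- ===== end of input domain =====

-- B replaces A's mutable list copy (rewriting the third char of each matched '010') by a direct
-- index scan over the original string that skips 3 positions after a match; objective: simpler.

-- ===== PORT A =====
-- for idx in range(0, len(arr)): if arr[idx:idx+3] == ['0','1','0']: arr[idx+2] = '1'; operations += 1
def beautifulBinaryString (binString : String) : Int :=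
  let arr : List Char := binString.toList
  let st :=
    (PySem.List.pyRange 0 (arr.length : Int) 1).foldl
      (fun (st : List Char × Int) (idx : Int) =>
        if PySem.List.slice st.1 (some idx) (some (idx + 3)) = ['0', '1', '0'] then
          (PySem.List.pySetD st.1 (idx + 2) '1', st.2 + 1)
        else st)
      (arr, 0)
  st.2

-- ===== PORT B =====
-- while i <= n - 3: if binString[i:i+3] == "010": operations += 1; i += 3 else: i += 1
-- (i and n are nonnegative throughout, so the loop counter is a Nat; `i + 3 ≤ n` is Python's `i <= n - 3`)
def pvAltGo (s : List Char) (n : Nat) (operations : Int) (i : Nat) : Int :=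
  if i + 3 ≤ n then
    if PySem.List.slice s (some (i : Int)) (some ((i : Int) + 3)) = ['0', '1', '0'] then
      pvAltGo s n (operations + 1) (i + 3)
    else
      pvAltGo s n operations (i + 1)
  else operations
termination_by n - i

def beautifulBinaryString_alt (binString : String) : Int :=
  pvAltGo binString.toList binString.toList.length 0 0

-- ===== PRECONDITION & SPEC =====
def Spec_beautifulBinaryString (binString : String) (out : Int) : Prop := out = beautifulBinaryString_alt binString
instance (binString : String) (out : Int) : Decidable (Spec_beautifulBinaryString binString out) := by unfold Spec_beautifulBinaryString; infer_instance

-- ===== CLAIM (what is proved, stated in full; the proofs are below) =====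
def Claim_equal_beautifulBinaryString : Prop := ∀ (binString : String), Dom_beautifulBinaryString binString → Spec_beautifulBinaryString binString (beautifulBinaryString binString)

-- ===== LEMMAS AND PROOFS =====

-- Greedy non-overlapping count of '010' triples: the common characterisation of both ports.
def pvG : List Char → Int
  | a :: b :: c :: r => if a = '0' ∧ b = '1' ∧ c = '0' then 1 + pvG r else pvG (b :: c :: r)
  | _ => 0

-- What A's loop computes on the suffix not yet scanned (mutation included: after a match the
-- next suffix starts with b and the overwritten '1').
def pvL : List Char → Int
  | a :: b :: c :: r => if a = '0' ∧ b = '1' ∧ c = '0' then 1 + pvL (b :: '1' :: r) else pvL (b :: c :: r)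
  | _ => 0
termination_by s => s.length

theorem pvG_short (s : List Char) (h : s.length ≤ 2) : pvG s = 0 := by
  match s with
  | [] => simp [pvG]
  | [a] => simp [pvG]
  | [a, b] => simp [pvG]
  | a :: b :: c :: r => simp at h

theorem pvL_cons_one (s : List Char) : pvL ('1' :: s) = pvL s := by
  match s with
  | [] => simp [pvL]
  | [b] => simp [pvL]
  | b :: c :: r => rw [pvL]; simp [Char.reduceEq]

theorem pvL_eq_pvG (s : List Char) : pvL s = pvG s := by
  match s with
  | [] => simp [pvL, pvG]
  | [a] => simp [pvL, pvG]
  | [a, b] => simp [pvL, pvG]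
  | a :: b :: c :: r =>
    by_cases h : a = '0' ∧ b = '1' ∧ c = '0'
    · obtain ⟨h1, h2, h3⟩ := h
      subst h1; subst h2; subst h3
      rw [pvL, pvG]
      simp [pvL_cons_one, pvL_eq_pvG r]
    · rw [pvL, pvG, if_neg h, if_neg h]
      exact pvL_eq_pvG (b :: c :: r)
termination_by s.length

-- setting position pre.length + k of pre ++ l sets position k of l
theorem pv_set_append (pre l : List Char) (k : Nat) (x : Char) :
    (pre ++ l).set (pre.length + k) x = pre ++ l.set k x := by
  induction pre with
  | nil => simp
  | cons p ps ih => simp [Nat.succ_add, ih]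

-- A's loop step
def pvStepA (st : List Char × Int) (idx : Int) : List Char × Int :=
  if PySem.List.slice st.1 (some idx) (some (idx + 3)) = ['0', '1', '0'] then
    (PySem.List.pySetD st.1 (idx + 2) '1', st.2 + 1)
  else st

theorem pvFoldA (n : Nat) : ∀ (suf pre : List Char) (ops : Int), suf.length = n →
    ((PySem.List.pyRange (pre.length : Int) ((pre.length : Int) + (suf.length : Int)) 1).foldl
       pvStepA (pre ++ suf, ops)).2 = ops + pvL suf := by
  induction n with
  | zero =>
    intro suf pre ops h
    have hs : suf = [] := List.eq_nil_of_length_eq_zero h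
    subst hs
    simp [PySem.List.pyRange_one_eq_nil, pvL]
  | succ m ih =>
    intro suf pre ops h
    match suf with
    | a :: t =>
      have hlt : (pre.length : Int) < (pre.length : Int) + ((a :: t).length : Int) := by
        simp only [List.length_cons]; omega
      rw [PySem.List.pyRange_one_cons hlt, List.foldl_cons]
      have hslice : PySem.List.slice (pre ++ a :: t) (some (pre.length : Int))
          (some ((pre.length : Int) + 3)) = (a :: t).take 3 := by
        have := PySem.List.slice_natCast_add (pre ++ a :: t) pre.length 3
        simpa using this
      match t with
      | [] =>
        -- suffix of length 1: slice has length 1, never matches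
        have hstep : pvStepA (pre ++ [a], ops) (pre.length : Int) = (pre ++ [a], ops) := by
          simp [pvStepA, hslice]
        rw [hstep]
        have h2 : ([] : List Char).length = m := by simp only [List.length_cons, List.length_nil] at h ⊢; omega
        have H := ih [] (pre ++ [a]) ops h2
        simp only [List.append_nil, List.length_append, List.length_cons, List.length_nil] at H ⊢
        push_cast at H ⊢
        ring_nf at H ⊢
        rw [H]; simp [pvL]
      | [b] =>
        have hstep : pvStepA (pre ++ [a, b], ops) (pre.length : Int) = (pre ++ [a, b], ops) := by
          simp [pvStepA, hslice]
        rw [hstep]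
        have h2 : ([b] : List Char).length = m := by simp only [List.length_cons, List.length_nil] at h ⊢; omega
        have H := ih [b] (pre ++ [a]) ops h2
        simp only [List.append_assoc, List.cons_append, List.nil_append,
          List.length_append, List.length_cons, List.length_nil] at H ⊢
        push_cast at H ⊢
        ring_nf at H ⊢
        rw [H]; simp [pvL]
      | b :: c :: r =>
        have htake : (a :: b :: c :: r).take 3 = [a, b, c] := by simp
        by_cases hm : a = '0' ∧ b = '1' ∧ c = '0'
        · -- match: mutate position pre.length+2 to '1', count 1, continue
          have hstep : pvStepA (pre ++ a :: b :: c :: r, ops) (pre.length : Int)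
              = (pre ++ a :: b :: '1' :: r, ops + 1) := by
            unfold pvStepA
            rw [hslice, htake, if_pos (by rw [hm.1, hm.2.1, hm.2.2])]
            have hset : PySem.List.pySetD (pre ++ a :: b :: c :: r) ((pre.length : Int) + 2) '1'
                = pre ++ a :: b :: '1' :: r := by
              have hc : ((pre.length : Int) + 2) = ((pre.length + 2 : Nat) : Int) := by push_cast; ring
              rw [hc, PySem.List.pySetD_natCast]
              simpa [List.set] using pv_set_append pre (a :: b :: c :: r) 2 '1'
            rw [hset]
          rw [hstep]
          have h2 : (b :: '1' :: r).length = m := by simp only [List.length_cons] at h ⊢; omega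
          have H := ih (b :: '1' :: r) (pre ++ [a]) (ops + 1) h2
          simp only [List.append_assoc, List.cons_append, List.nil_append,
            List.length_append, List.length_cons, List.length_nil] at H ⊢
          push_cast at H ⊢
          ring_nf at H ⊢
          rw [H, show pvL (a :: b :: c :: r) = 1 + pvL (b :: '1' :: r) from by
            rw [pvL, if_pos hm]]
          ring
        · -- no match: state unchanged
          have hstep : pvStepA (pre ++ a :: b :: c :: r, ops) (pre.length : Int)
              = (pre ++ a :: b :: c :: r, ops) := by
            unfold pvStepA
            rw [hslice, htake,
              if_neg (by intro hc; simp at hc; exact hm ⟨hc.1, hc.2.1, hc.2.2⟩)]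
          rw [hstep]
          have h2 : (b :: c :: r).length = m := by simp only [List.length_cons] at h ⊢; omega
          have H := ih (b :: c :: r) (pre ++ [a]) ops h2
          simp only [List.append_assoc, List.cons_append, List.nil_append,
            List.length_append, List.length_cons, List.length_nil] at H ⊢
          push_cast at H ⊢
          ring_nf at H ⊢
          rw [H, show pvL (a :: b :: c :: r) = pvL (b :: c :: r) from by
            rw [pvL, if_neg hm]]

theorem pvA_eq_pvG (b : String) : beautifulBinaryString b = pvG b.toList := by
  unfold beautifulBinaryString
  have H := pvFoldA b.toList.length b.toList [] 0 rfl
  simp only [List.length_nil, Nat.cast_zero, List.nil_append, zero_add] at H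
  rw [pvL_eq_pvG] at H
  exact H

theorem pvAltGo_eq (s : List Char) : ∀ (k i : Nat) (ops : Int), s.length - i ≤ k →
    pvAltGo s s.length ops i = ops + pvG (s.drop i) := by
  intro k
  induction k with
  | zero =>
    intro i ops hk
    rw [pvAltGo, if_neg (by omega)]
    have hsh : (s.drop i).length ≤ 2 := by rw [List.length_drop]; omega
    rw [pvG_short _ hsh]; ring
  | succ k ihk =>
    intro i ops hk
    rw [pvAltGo]
    by_cases hle : i + 3 ≤ s.length
    · have hslice : PySem.List.slice s (some (i : Int)) (some ((i : Int) + 3))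
          = (s.drop i).take 3 := by
        have := PySem.List.slice_natCast_add s i 3
        simpa using this
      have hlen : (s.drop i).length = s.length - i := by simp
      match hd : s.drop i with
      | [] => exfalso; rw [hd] at hlen; simp at hlen; omega
      | [a] => exfalso; rw [hd] at hlen; simp at hlen; omega
      | [a, b] => exfalso; rw [hd] at hlen; simp at hlen; omega
      | a :: b :: c :: r =>
        have hr : s.drop (i + 3) = r := by
          rw [← List.drop_drop, hd]; rfl
        have hr1 : s.drop (i + 1) = b :: c :: r := by
          rw [← List.drop_drop, hd]; rfl
        rw [if_pos hle, hslice, hd]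
        by_cases hm : a = '0' ∧ b = '1' ∧ c = '0'
        · rw [if_pos (by simp only [List.take_succ_cons, List.take_zero]; rw [hm.1, hm.2.1, hm.2.2])]
          rw [ihk (i + 3) (ops + 1) (by omega), hr,
            show pvG (a :: b :: c :: r) = 1 + pvG r from by rw [pvG, if_pos hm]]
          ring
        · rw [if_neg (by simp only [List.take_succ_cons, List.take_zero]; intro hc; simp at hc; exact hm ⟨hc.1, hc.2.1, hc.2.2⟩)]
          rw [ihk (i + 1) ops (by omega), hr1,
            show pvG (a :: b :: c :: r) = pvG (b :: c :: r) from by rw [pvG, if_neg hm]]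
    · rw [if_neg hle]
      have hsh : (s.drop i).length ≤ 2 := by rw [List.length_drop]; omega
      rw [pvG_short _ hsh]; ring

theorem pvB_eq_pvG (b : String) : beautifulBinaryString_alt b = pvG b.toList := by
  unfold beautifulBinaryString_alt
  simpa using pvAltGo_eq b.toList b.toList.length 0 0 (by omega)

-- ===== VERDICT (by name: the statement is the Claim_ definition above) =====
theorem beautifulBinaryString_spec : Claim_equal_beautifulBinaryString := by
  intro binString _
  unfold Spec_beautifulBinaryString
  rw [pvA_eq_pvG, pvB_eq_pvG]
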